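-- pv_equiv track=rewrite | github.com/dash-arch-ad/meta-ads-cli-test | scripts/monitor_meta_ads.py | insights_window
-- ===== SOURCE A (Python) =====
-- from typing import Any
--
-- def insights_window(config: dict[str, Any]) -> str:
--     windows = {
--         str(rule.get("window"))
--         for rule in (config.get("rules") or [])
--         if rule.get("window")
--     }
--     if not windows:
--         return "24h"
--     if len(windows) > 1:
--         raise ValueError("All initial rules must use the same window for one CLI insights call.")
--     return next(iter(windows))
-- ===== SOURCE B (Python) =====
-- def insights_window(config):
--     window = None
--     for rule in (config.get("rules") or []):
--         w = rule.get("window")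
--         if not w:
--             continue
--         w = str(w)
--         if window is None:
--             window = w
--         elif w != window:
--             raise ValueError("All initial rules must use the same window for one CLI insights call.")
--     return window if window is not None else "24h"
-- ===== Notes on version B (the rewrite author's own statement) =====
-- stated objective: simpler
-- what changed: B replaces A's build-a-set-of-all-windows-then-count decomposition with a single pass that keeps one running window and raises immediately on the first mismatch; no set is materialised.
import Mathlib
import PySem

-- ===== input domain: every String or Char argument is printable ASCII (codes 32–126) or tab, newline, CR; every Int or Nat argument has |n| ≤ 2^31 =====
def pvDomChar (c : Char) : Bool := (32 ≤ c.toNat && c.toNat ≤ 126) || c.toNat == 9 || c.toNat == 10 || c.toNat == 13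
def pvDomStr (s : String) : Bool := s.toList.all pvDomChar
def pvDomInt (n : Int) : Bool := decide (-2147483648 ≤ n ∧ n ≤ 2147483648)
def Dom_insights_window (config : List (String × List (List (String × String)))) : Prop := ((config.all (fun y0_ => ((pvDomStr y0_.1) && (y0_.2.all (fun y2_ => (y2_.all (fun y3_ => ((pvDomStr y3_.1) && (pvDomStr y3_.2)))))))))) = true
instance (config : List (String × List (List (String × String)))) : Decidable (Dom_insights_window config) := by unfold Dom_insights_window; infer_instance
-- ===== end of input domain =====

-- B is a single running-window pass with an early raise, instead of A's
-- materialised set of all windows checked afterwards; return value only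
-- (neither program mutates its argument).

-- ===== PORT A =====
-- the set comprehension: a fold of Set.add over the rules, filtered on a truthy "window"
def pvAddWindow (s : PySem.Set String) (rule : List (String × String)) : PySem.Set String :=
  match (PySem.Dict.mk rule).get? "window" with
  | some w => if w ≠ "" then PySem.Set.add s w else s   -- str(w) = w : the value is already a string
  | none => s

def insights_window (config : List (String × List (List (String × String)))) : String :=
  let rules := (PySem.Dict.mk config).getD "rules" []   -- `or []`: only the empty list replaces a falsy value here
  let windows : PySem.Set String := rules.foldl pvAddWindow PySem.Set.empty
  match windows with
  | [] => "24h"                                         -- `if not windows`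
  | w :: _ => w                                         -- len(windows) > 1 raises ValueError: excluded by Pre_;
                                                        -- next(iter(windows)) is exact only for the singleton set

-- ===== PORT B =====
def pvAltLoop (rules : List (List (String × String))) (window : Option String) : Option String :=
  match rules with
  | [] => window
  | r :: rs =>
    match (PySem.Dict.mk r).get? "window" with
    | some w =>
      if w ≠ "" then
        match window with
        | none => pvAltLoop rs (some w)
        | some v => if w ≠ v then window   -- Python B raises ValueError here: excluded by Pre_
                    else pvAltLoop rs window
      else pvAltLoop rs window             -- falsy "": continue
    | none => pvAltLoop rs window          -- missing key: continue

def insights_window_alt (config : List (String × List (List (String × String)))) : String :=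
  let rules := (PySem.Dict.mk config).getD "rules" []
  match pvAltLoop rules none with
  | some w => w
  | none => "24h"

-- ===== PRECONDITION & SPEC =====
-- the truthy window of a rule, if any (used only to state Pre_)
def pvRuleWindow (rule : List (String × String)) : Option String :=
  match (PySem.Dict.mk rule).get? "window" with
  | some w => if w ≠ "" then some w else none
  | none => none

-- Pre_ excludes exactly the inputs with two distinct truthy windows, on which
-- both Python A and Python B raise ValueError.
def Pre_insights_window (config : List (String × List (List (String × String)))) : Prop :=
  (((PySem.Dict.mk config).getD "rules" []).filterMap pvRuleWindow).Pairwise (· = ·)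
instance (config : List (String × List (List (String × String)))) : Decidable (Pre_insights_window config) := by unfold Pre_insights_window; infer_instance

def pvWitness_insights_window : (List (String × List (List (String × String)))) :=
  [("rules", [[("window", "1h")], [("mode", "x")], [("window", "1h")]])]

def Spec_insights_window (config : List (String × List (List (String × String)))) (out : String) : Prop := out = insights_window_alt config
instance (config : List (String × List (List (String × String)))) (out : String) : Decidable (Spec_insights_window config out) := by unfold Spec_insights_window; infer_instance

-- ===== CLAIM (what is proved, stated in full; the proofs are below) =====
def Claim_equal_insights_window : Prop := ∀ (config : List (String × List (List (String × String)))), Dom_insights_window config → Pre_insights_window config → Spec_insights_window config (insights_window config)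

-- ===== LEMMAS AND PROOFS =====

-- one step of A's fold, expressed through pvRuleWindow
theorem pvAddWindow_eq (s : PySem.Set String) (r : List (String × String)) :
    pvAddWindow s r = match pvRuleWindow r with
      | some w => PySem.Set.add s w
      | none => s := by
  unfold pvAddWindow pvRuleWindow
  cases (PySem.Dict.mk r).get? "window" with
  | none => rfl
  | some w => by_cases h : w = "" <;> simp [h]

-- core invariant: with agreeing windows, A's accumulator set is exactly B's
-- running window (as a zero/one-element list), so the two loops coincide.
theorem pv_loop_eq (rules : List (List (String × String))) (o : Option String)
    (h : (o.toList ++ rules.filterMap pvRuleWindow).Pairwise (· = ·)) :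
    rules.foldl pvAddWindow o.toList = (pvAltLoop rules o).toList := by
  induction rules generalizing o with
  | nil => simp [pvAltLoop]
  | cons r rs ih =>
    rw [List.foldl_cons, pvAddWindow_eq]
    unfold pvAltLoop
    cases hr : pvRuleWindow r with
    | none =>
      have hb : (PySem.Dict.mk r).get? "window" = none ∨
          ∃ w, (PySem.Dict.mk r).get? "window" = some w ∧ w = "" := by
        unfold pvRuleWindow at hr
        cases hg : (PySem.Dict.mk r).get? "window" with
        | none => exact Or.inl rfl
        | some w =>
          refine Or.inr ⟨w, rfl, ?_⟩
          rw [hg] at hr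
          by_cases h0 : w = ""
          · exact h0
          · simp [h0] at hr
      have htail : (o.toList ++ rs.filterMap pvRuleWindow).Pairwise (· = ·) := by
        rw [List.filterMap_cons, hr] at h; exact h
      rcases hb with hg | ⟨w, hg, h0⟩
      · simp only [hg]; exact ih o htail
      · simp only [hg, h0, ne_eq, not_true_eq_false, if_false]
        exact ih o htail
    | some w =>
      have hg : (PySem.Dict.mk r).get? "window" = some w ∧ w ≠ "" := by
        unfold pvRuleWindow at hr
        cases hg : (PySem.Dict.mk r).get? "window" with
        | none => rw [hg] at hr; simp at hr
        | some u =>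
          rw [hg] at hr
          by_cases h0 : u = "" <;> simp [h0] at hr <;> (try subst hr)
          · exact ⟨rfl, h0⟩
      rw [List.filterMap_cons, hr] at h
      simp only [hg.1, hg.2, ne_eq, not_false_eq_true, if_true]
      cases o with
      | none =>
        have htail : ((some w).toList ++ rs.filterMap pvRuleWindow).Pairwise (· = ·) := by
          simpa using h
        have : PySem.Set.add (Option.toList (none : Option String)) w = (some w).toList := by
          simp [PySem.Set.add, PySem.Set.contains, Option.toList]
        rw [this]; exact ih (some w) htail
      | some v =>
        have hvw : v = w := by
          simp only [Option.toList, List.cons_append, List.pairwise_cons] at h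
          exact h.1 w (by simp)
        subst hvw
        have htail : ((some v).toList ++ rs.filterMap pvRuleWindow).Pairwise (· = ·) := by
          simp only [Option.toList, List.cons_append, List.nil_append] at h ⊢
          exact h.of_cons
        have : PySem.Set.add (Option.toList (some v)) v = (some v).toList := by
          simp [PySem.Set.add, PySem.Set.contains, Option.toList]
        simp only [not_true_eq_false, if_false, this]
        exact ih (some v) htail

-- ===== VERDICT (by name: the statement is the Claim_ definition above) =====
theorem pv_final (rules : List (List (String × String)))
    (h : (rules.filterMap pvRuleWindow).Pairwise (· = ·)) :
    (match rules.foldl pvAddWindow PySem.Set.empty with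
     | [] => "24h"
     | w :: _ => w) =
    (match pvAltLoop rules none with
     | some w => w
     | none => "24h") := by
  have he := pv_loop_eq rules none (by simpa using h)
  simp only [Option.toList] at he
  rw [show (PySem.Set.empty : PySem.Set String) = ([] : List String) from rfl, he]
  cases pvAltLoop rules none <;> rfl

theorem insights_window_spec : Claim_equal_insights_window := by
  intro config _ hpre
  exact pv_final ((PySem.Dict.mk config).getD "rules" []) hpre
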